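-- pv_equiv track=rewrite | github.com/DragunWF/Competitive-Programming | CodeWars/python/6_kyu/ragbaby_cipher.py | operate_cipher
-- ===== SOURCE A (Python) =====
-- from string import ascii_uppercase, ascii_lowercase
--
-- def operate_cipher(text: str, key: str, is_encryption: bool) -> str:
--     cipher_map = generate_cipher_map(key)
--     shifted_chars = []
--     char_pos = 0
--     for char in text:
--         if not char.isalpha():
--             char_pos = 0
--             shifted_chars.append(char)
--             continue
--
--         indices = cipher_map["upper_indices" if char.isupper() else "lower_indices"]
--         current_map = cipher_map["upper" if char.isupper() else "lower"]
--
--         shifted_index = None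
--         if is_encryption:
--             shifted_index = (indices[char] + char_pos + 1) % len(indices)
--         else:
--             shifted_index = (indices[char] - (char_pos + 1)) % len(indices)
--
--         shifted_chars.append(current_map[shifted_index])
--         char_pos += 1
--     return "".join(shifted_chars)
--
-- def generate_cipher_map(key: str) -> dict:
--     unique_in_order = []
--     for char in key:
--         if not char in unique_in_order:
--             unique_in_order.append(char)
--     key = "".join(unique_in_order)
--
--     uppercase = key.upper() + "".join(char for char in ascii_uppercase if not char in key.upper())
--     lowercase = key + "".join(char for char in ascii_lowercase if not char in key)
--     return {"upper_indices": map_indices(uppercase),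
--             "upper": uppercase,
--             "lower_indices": map_indices(lowercase),
--             "lower": lowercase}
--
-- def map_indices(pool: str) -> dict:
--     mapped_indicies = {}
--     for i, char in enumerate(pool):
--         mapped_indicies[char] = i
--     return mapped_indicies
-- ===== SOURCE B (Python) =====
-- from string import ascii_uppercase, ascii_lowercase
--
--
-- def operate_cipher(text: str, key: str, is_encryption: bool) -> str:
--     dedup = "".join(dict.fromkeys(key))
--     upper = dedup.upper() + "".join(c for c in ascii_uppercase if c not in dedup.upper())
--     lower = dedup + "".join(c for c in ascii_lowercase if c not in dedup)
--     upper_idx = {c: i for i, c in enumerate(upper)}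
--     lower_idx = {c: i for i, c in enumerate(lower)}
--     sign = 1 if is_encryption else -1
--
--     out = []
--     j, n = 0, len(text)
--     while j < n:
--         if not text[j].isalpha():
--             out.append(text[j])
--             j += 1
--             continue
--         k = j
--         while k < n and text[k].isalpha():
--             k += 1
--         for i, c in enumerate(text[j:k]):
--             if c.isupper():
--                 out.append(upper[(upper_idx[c] + sign * (i + 1)) % len(upper_idx)])
--             else:
--                 out.append(lower[(lower_idx[c] + sign * (i + 1)) % len(lower_idx)])
--         j = k
--     return "".join(out)
-- ===== Notes on version B (the rewrite author's own statement) =====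
-- stated objective: idiomatic
-- what changed: Replaces A's flat character loop with a resetting char_pos counter (and its dict-of-four cipher map built by helper functions) by a word-run scanner: dedupe the key with dict.fromkeys, build the two keyed alphabets and index maps inline, then walk the text run by run, enumerating the letters of each maximal alpha run from 0 and shifting each by sign*(i+1) modulo the alphabet size.
import Mathlib
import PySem

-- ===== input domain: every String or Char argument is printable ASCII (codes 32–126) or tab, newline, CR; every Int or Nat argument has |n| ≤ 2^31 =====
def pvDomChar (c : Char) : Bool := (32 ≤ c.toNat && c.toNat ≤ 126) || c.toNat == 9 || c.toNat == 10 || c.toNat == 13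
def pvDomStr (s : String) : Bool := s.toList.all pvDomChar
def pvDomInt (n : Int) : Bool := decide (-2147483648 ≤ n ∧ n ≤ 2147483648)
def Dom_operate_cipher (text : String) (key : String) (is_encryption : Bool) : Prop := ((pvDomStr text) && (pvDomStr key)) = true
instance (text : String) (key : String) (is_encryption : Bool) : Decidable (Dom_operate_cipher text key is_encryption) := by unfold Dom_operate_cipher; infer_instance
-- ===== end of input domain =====

-- Ragbaby cipher: B replaces A's flat loop with a resetting char_pos counter by a run-based
-- scanner that enumerates each maximal alphabetic run from 0 and shifts by sign*(i+1) (idiomatic decomposition).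


-- ===== PORT A =====
def pvAsciiUppercase : List Char := "ABCDEFGHIJKLMNOPQRSTUVWXYZ".toList
def pvAsciiLowercase : List Char := "abcdefghijklmnopqrstuvwxyz".toList

-- for i, char in enumerate(pool): mapped_indicies[char] = i
def map_indices (pool : List Char) : PySem.Dict Char Int :=
  (PySem.List.enumerate pool).foldl (fun d p => d.insert p.2 p.1) PySem.Dict.empty

-- returns (upper_indices, upper, lower_indices, lower)
def generate_cipher_map (key : List Char) :
    PySem.Dict Char Int × List Char × PySem.Dict Char Int × List Char :=
  let uniqueInOrder := key.foldl (fun acc c => if acc.contains c then acc else acc ++ [c]) []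
  let key := uniqueInOrder
  let uppercase := PySem.Chars.upper key ++
    pvAsciiUppercase.filter (fun c => ! (PySem.Chars.upper key).contains c)
  let lowercase := key ++ pvAsciiLowercase.filter (fun c => ! key.contains c)
  (map_indices uppercase, uppercase, map_indices lowercase, lowercase)

-- one iteration body on an alphabetic char: indices[char] lookup, shift, current_map[shifted_index]
def pvShiftA (cm : PySem.Dict Char Int × List Char × PySem.Dict Char Int × List Char)
    (is_encryption : Bool) (c : Char) (pos : Int) : Char :=
  let indices := if PySem.Chars.isupper c then cm.1 else cm.2.2.1
  let currentMap := if PySem.Chars.isupper c then cm.2.1 else cm.2.2.2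
  match indices.get? c with
  | none => c   -- Python raises KeyError here; unreachable for ASCII alphabetic c
  | some i =>
    let shiftedIndex := if is_encryption then PySem.Int.mod (i + pos + 1) indices.size
                        else PySem.Int.mod (i - (pos + 1)) indices.size
    PySem.List.pyGetD currentMap shiftedIndex c   -- index is in range: 0 ≤ shiftedIndex < size ≤ length

-- the for-loop over text with the resetting char_pos counter
def pvLoopA (cm : PySem.Dict Char Int × List Char × PySem.Dict Char Int × List Char)
    (is_encryption : Bool) : List Char → Int → List Char
  | [], _ => []
  | c :: rest, pos =>
    if PySem.Chars.isalpha c = false then c :: pvLoopA cm is_encryption rest 0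
    else pvShiftA cm is_encryption c pos :: pvLoopA cm is_encryption rest (pos + 1)

def operate_cipher (text : String) (key : String) (is_encryption : Bool) : String :=
  String.mk (pvLoopA (generate_cipher_map key.toList) is_encryption text.toList 0)

-- ===== PORT B =====
-- per-letter shift inside a run: position i (from enumerate), shift by sign*(i+1)
def pvShiftB (up : List Char) (upI : PySem.Dict Char Int) (lo : List Char)
    (loI : PySem.Dict Char Int) (sign : Int) (c : Char) (i : Int) : Char :=
  if PySem.Chars.isupper c then
    match upI.get? c with
    | none => c   -- Python raises KeyError here; unreachable for ASCII alphabetic c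
    | some x => PySem.List.pyGetD up (PySem.Int.mod (x + sign * (i + 1)) upI.size) c
  else
    match loI.get? c with
    | none => c
    | some x => PySem.List.pyGetD lo (PySem.Int.mod (x + sign * (i + 1)) loI.size) c

-- for i, c in enumerate(text[j:k]): …
def pvRunB (up : List Char) (upI : PySem.Dict Char Int) (lo : List Char)
    (loI : PySem.Dict Char Int) (sign : Int) (run : List Char) : List Char :=
  (PySem.List.enumerate run).map (fun p => pvShiftB up upI lo loI sign p.2 p.1)

-- the outer while loop: copy a non-letter, or process a maximal alphabetic run
def pvLoopB (up : List Char) (upI : PySem.Dict Char Int) (lo : List Char)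
    (loI : PySem.Dict Char Int) (sign : Int) : List Char → List Char
  | [] => []
  | c :: rest =>
    if PySem.Chars.isalpha c = false then c :: pvLoopB up upI lo loI sign rest
    else pvRunB up upI lo loI sign (c :: rest.takeWhile PySem.Chars.isalpha) ++
         pvLoopB up upI lo loI sign (rest.dropWhile PySem.Chars.isalpha)
termination_by cs => cs.length
decreasing_by
  · simp
  · have := List.length_dropWhile_le PySem.Chars.isalpha rest
    simp; omega

def operate_cipher_alt (text : String) (key : String) (is_encryption : Bool) : String :=
  let dedup := PySem.List.dedup key.toList
  let upper := PySem.Chars.upper dedup ++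
    pvAsciiUppercase.filter (fun c => ! (PySem.Chars.upper dedup).contains c)
  let lower := dedup ++ pvAsciiLowercase.filter (fun c => ! dedup.contains c)
  let upperIdx := (PySem.List.enumerate upper).foldl (fun d p => d.insert p.2 p.1) PySem.Dict.empty
  let lowerIdx := (PySem.List.enumerate lower).foldl (fun d p => d.insert p.2 p.1) PySem.Dict.empty
  let sign : Int := if is_encryption then 1 else -1
  String.mk (pvLoopB upper upperIdx lower lowerIdx sign text.toList)

-- ===== PRECONDITION & SPEC =====
def Spec_operate_cipher (text : String) (key : String) (is_encryption : Bool) (out : String) : Prop := out = operate_cipher_alt text key is_encryption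
instance (text : String) (key : String) (is_encryption : Bool) (out : String) : Decidable (Spec_operate_cipher text key is_encryption out) := by unfold Spec_operate_cipher; infer_instance

-- ===== CLAIM (what is proved, stated in full; the proofs are below) =====
def Claim_equal_operate_cipher : Prop := ∀ (text : String) (key : String) (is_encryption : Bool), Dom_operate_cipher text key is_encryption → Spec_operate_cipher text key is_encryption (operate_cipher text key is_encryption)

-- ===== LEMMAS AND PROOFS =====

-- A's manual ordered dedup is dict.fromkeys' dedup
theorem pv_dedup_eq (cs : List Char) :
    cs.foldl (fun acc c => if acc.contains c then acc else acc ++ [c]) [] = PySem.List.dedup cs := by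
  have h : (fun (acc : List Char) c => if c ∈ acc then acc else acc ++ [c]) = PySem.Set.add := by
    funext acc c
    simp only [PySem.Set.add]
    split_ifs <;> simp_all
  simp [PySem.List.dedup, PySem.Set.ofList, h]

-- A's per-char shift at counter value p equals B's per-char shift at run index p
theorem pv_shift_eq (up lo : List Char) (upI loI : PySem.Dict Char Int) (e : Bool) (c : Char) (p : Int) :
    pvShiftA (upI, up, loI, lo) e c p = pvShiftB up upI lo loI (if e then 1 else -1) c p := by
  unfold pvShiftA pvShiftB
  by_cases hu : PySem.Chars.isupper c = true
  · simp only [hu, if_true, ite_true]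
    cases hg : upI.get? c with
    | none => cases e <;> simp [hg]
    | some x =>
      cases e <;> simp only [hg, Bool.false_eq_true, if_false, if_true, ite_true, ite_false] <;>
        (congr 2 <;> ring)
  · simp only [hu, if_false, ite_false, Bool.false_eq_true]
    cases hg : loI.get? c with
    | none => cases e <;> simp [hg]
    | some x =>
      cases e <;> simp only [hg, Bool.false_eq_true, if_false, if_true, ite_true, ite_false] <;>
        (congr 2 <;> ring)

-- pvLoopB always splits off the maximal alphabetic prefix (trivially when it is empty)
theorem pv_loopB_unfold (up lo : List Char) (upI loI : PySem.Dict Char Int) (s : Int) (cs : List Char) :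
    pvLoopB up upI lo loI s cs =
      ((PySem.List.enumerate (cs.takeWhile PySem.Chars.isalpha)).map
        (fun q => pvShiftB up upI lo loI s q.2 q.1)) ++
      pvLoopB up upI lo loI s (cs.dropWhile PySem.Chars.isalpha) := by
  cases cs with
  | nil => simp [pvLoopB, pvRunB]
  | cons c rest =>
    by_cases h : PySem.Chars.isalpha c = true
    · simp [pvLoopB, pvRunB, PySem.List.enumerate_cons, List.takeWhile_cons, List.dropWhile_cons, h]
    · simp only [Bool.not_eq_true] at h
      simp [pvLoopB, pvRunB, List.takeWhile_cons, List.dropWhile_cons, h]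

-- main invariant: A's loop at counter p = B's shifted current run (enumerate from p) ++ B's loop on the rest
theorem pv_loop_eq (up lo : List Char) (upI loI : PySem.Dict Char Int) (e : Bool)
    (cs : List Char) (p : Int) :
    pvLoopA (upI, up, loI, lo) e cs p =
      ((PySem.List.enumerate (cs.takeWhile PySem.Chars.isalpha) p).map
        (fun q => pvShiftB up upI lo loI (if e then 1 else -1) q.2 q.1)) ++
      pvLoopB up upI lo loI (if e then 1 else -1) (cs.dropWhile PySem.Chars.isalpha) := by
  induction cs generalizing p with
  | nil => simp [pvLoopA, pvLoopB]
  | cons c rest ih =>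
    by_cases h : PySem.Chars.isalpha c = true
    · simp only [pvLoopA, h, Bool.true_eq_false, if_false, List.takeWhile_cons, h, if_true,
        List.dropWhile_cons, ite_true, PySem.List.enumerate_cons, List.map_cons, List.cons_append]
      rw [ih (p + 1), pv_shift_eq]
    · simp only [Bool.not_eq_true] at h
      simp only [pvLoopA, h, if_true, List.takeWhile_cons, List.dropWhile_cons, h,
        Bool.false_eq_true, if_false, PySem.List.enumerate_nil, List.map_nil, List.nil_append,
        ite_false]
      rw [ih 0, ← pv_loopB_unfold]
      simp [pvLoopB, h]

-- ===== VERDICT (by name: the statement is the Claim_ definition above) =====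
theorem operate_cipher_spec : Claim_equal_operate_cipher := by
  intro text key e _
  unfold Spec_operate_cipher operate_cipher operate_cipher_alt generate_cipher_map
  simp only [pv_dedup_eq, map_indices]
  rw [pv_loop_eq, ← pv_loopB_unfold]
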